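-- pv_equiv track=rewrite | github.com/Cedric-White/Python-Stuff | Repo-whit2945/hw5/hw5.py | wizards
-- ===== SOURCE A (Python) =====
-- def wizards(grades, life, sleep):
--     num = len(grades) + len(life) + len(sleep)
--     wizlist = [""]*num
--     count = 0
--     for i in range(len(grades)):
--         for j in range(len(life)):
--             for s in range(len(sleep)):
--                 if (grades[i] == life[j]) and (sleep[s] == grades[i]) and (life[j] == sleep[s]):
--                     wizlist[count] = grades[i]
--                     count+=1
--     return wizlist[0:count]
-- ===== SOURCE B (Python) =====
-- def wizards(grades, life, sleep):
--     cl = {}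
--     for x in life:
--         cl[x] = cl.get(x, 0) + 1
--     cs = {}
--     for x in sleep:
--         cs[x] = cs.get(x, 0) + 1
--     out = []
--     for g in grades:
--         out.extend([g] * (cl.get(g, 0) * cs.get(g, 0)))
--     return out
-- ===== Notes on version B (the rewrite author's own statement) =====
-- stated objective: faster
-- what changed: Replaced the triple nested index loops writing into a preallocated fixed-size buffer by two hash-map frequency counts over life and sleep and a single pass over grades appending each element count_life*count_sleep times; Pre_ excludes only the inputs on which A raises IndexError because the matching triples overflow its buffer of size len(grades)+len(life)+len(sleep).
import Mathlib
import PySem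

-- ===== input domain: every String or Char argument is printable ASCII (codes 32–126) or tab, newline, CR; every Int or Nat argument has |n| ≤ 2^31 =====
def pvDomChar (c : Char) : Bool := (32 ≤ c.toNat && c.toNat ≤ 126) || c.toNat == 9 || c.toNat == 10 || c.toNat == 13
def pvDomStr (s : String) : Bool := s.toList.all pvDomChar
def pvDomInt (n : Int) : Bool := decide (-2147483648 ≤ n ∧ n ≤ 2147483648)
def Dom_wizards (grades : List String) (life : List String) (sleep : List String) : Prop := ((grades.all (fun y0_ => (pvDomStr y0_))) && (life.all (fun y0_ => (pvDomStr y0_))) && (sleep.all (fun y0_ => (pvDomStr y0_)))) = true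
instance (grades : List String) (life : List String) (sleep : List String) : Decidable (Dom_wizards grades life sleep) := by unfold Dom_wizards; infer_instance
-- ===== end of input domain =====

-- ===== PORT A =====
-- B replaces A's triple nested index loops over a preallocated buffer by two frequency
-- counts and one pass over grades (objective: faster).
def wizards (grades : List String) (life : List String) (sleep : List String) : List String :=
  let num := grades.length + life.length + sleep.length
  let st : List String × Nat :=
    (PySem.List.pyRange 0 (grades.length : Int) 1).foldl (fun st i =>
      let g := PySem.List.pyGetD grades i ""
      (PySem.List.pyRange 0 (life.length : Int) 1).foldl (fun st j =>
        let l := PySem.List.pyGetD life j ""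
        (PySem.List.pyRange 0 (sleep.length : Int) 1).foldl (fun st s =>
          let sp := PySem.List.pyGetD sleep s ""
          if g == l && sp == g && l == sp then (st.1.set st.2 g, st.2 + 1) else st) st) st)
      (List.replicate num "", 0)
  PySem.List.slice st.1 (some 0) (some (st.2 : Int))

-- ===== PORT B =====
def wizards_alt (grades : List String) (life : List String) (sleep : List String) : List String :=
  let cl := life.foldl (fun d x => d.insert x (d.getD x 0 + 1)) (PySem.Dict.empty : PySem.Dict String Int)
  let cs := sleep.foldl (fun d x => d.insert x (d.getD x 0 + 1)) (PySem.Dict.empty : PySem.Dict String Int)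
  grades.foldl (fun out g => out ++ List.replicate (cl.getD g 0 * cs.getD g 0).toNat g) []

-- ===== PRECONDITION & SPEC =====
-- Pre_wizards: exactly the inputs on which A returns normally (the total number of
-- matching triples fits in A's preallocated buffer of size |grades|+|life|+|sleep|);
-- on the excluded inputs A raises IndexError.
def Pre_wizards (grades : List String) (life : List String) (sleep : List String) : Prop :=
  (grades.map (fun g => List.count g life * List.count g sleep)).sum ≤
    grades.length + life.length + sleep.length
instance (grades : List String) (life : List String) (sleep : List String) : Decidable (Pre_wizards grades life sleep) := by unfold Pre_wizards; infer_instance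
def pvWitness_wizards : List String × List String × List String := (["a", "b"], ["a", "c"], ["a"])
def Spec_wizards (grades : List String) (life : List String) (sleep : List String) (out : List String) : Prop := out = wizards_alt grades life sleep
instance (grades : List String) (life : List String) (sleep : List String) (out : List String) : Decidable (Spec_wizards grades life sleep out) := by unfold Spec_wizards; infer_instance

-- ===== CLAIM (what is proved, stated in full; the proofs are below) =====
def Claim_equal_wizards : Prop := ∀ (grades : List String) (life : List String) (sleep : List String), Dom_wizards grades life sleep → Pre_wizards grades life sleep → Spec_wizards grades life sleep (wizards grades life sleep)
-- ===== LEMMAS AND PROOFS =====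
-- the innermost step function of A, for fixed g l
def wizStep (g l : String) (st : List String × Nat) (sp : String) : List String × Nat :=
  if g == l && sp == g && l == sp then (st.1.set st.2 g, st.2 + 1) else st

lemma wiz_eq_foldl (grades life sleep : List String) :
    wizards grades life sleep =
      (grades.foldl (fun st g => life.foldl (fun st l => sleep.foldl (wizStep g l) st) st)
        (List.replicate (grades.length + life.length + sleep.length) "", 0)).1.take
      (grades.foldl (fun st g => life.foldl (fun st l => sleep.foldl (wizStep g l) st) st)
        (List.replicate (grades.length + life.length + sleep.length) "", 0)).2 := by
  have h3 : ∀ (g l : String) (st : List String × Nat),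
      (PySem.List.pyRange 0 (sleep.length : Int) 1).foldl (fun st s =>
        let sp := PySem.List.pyGetD sleep s ""
        if g == l && sp == g && l == sp then (st.1.set st.2 g, st.2 + 1) else st) st
      = sleep.foldl (wizStep g l) st := fun g l st =>
    PySem.List.foldl_pyRange_zero_pyGetD' sleep "" (wizStep g l) st
  have h2 : ∀ (g : String) (st : List String × Nat),
      (PySem.List.pyRange 0 (life.length : Int) 1).foldl (fun st j =>
        let l := PySem.List.pyGetD life j ""
        (PySem.List.pyRange 0 (sleep.length : Int) 1).foldl (fun st s =>
          let sp := PySem.List.pyGetD sleep s ""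
          if g == l && sp == g && l == sp then (st.1.set st.2 g, st.2 + 1) else st) st) st
      = life.foldl (fun st l => sleep.foldl (wizStep g l) st) st := by
    intro g st
    refine Eq.trans (PySem.List.foldl_pyRange_zero_pyGetD' life ""
      (fun (st : List String × Nat) (l : String) =>
        (PySem.List.pyRange 0 (sleep.length : Int) 1).foldl (fun (st : List String × Nat) s =>
          let sp := PySem.List.pyGetD sleep s ""
          if g == l && sp == g && l == sp then (st.1.set st.2 g, st.2 + 1) else st) st) st) ?_
    exact PySem.List.foldl_congr_mem _ _ _ _ (fun st l _ => h3 g l st)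
  have h1 :
      (PySem.List.pyRange 0 (grades.length : Int) 1).foldl (fun st i =>
        let g := PySem.List.pyGetD grades i ""
        (PySem.List.pyRange 0 (life.length : Int) 1).foldl (fun st j =>
          let l := PySem.List.pyGetD life j ""
          (PySem.List.pyRange 0 (sleep.length : Int) 1).foldl (fun st s =>
            let sp := PySem.List.pyGetD sleep s ""
            if g == l && sp == g && l == sp then (st.1.set st.2 g, st.2 + 1) else st) st) st)
        (List.replicate (grades.length + life.length + sleep.length) "", 0)
      = grades.foldl (fun st g => life.foldl (fun st l => sleep.foldl (wizStep g l) st) st)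
        (List.replicate (grades.length + life.length + sleep.length) "", 0) := by
    refine Eq.trans (PySem.List.foldl_pyRange_zero_pyGetD' grades ""
      (fun (st : List String × Nat) (g : String) =>
        (PySem.List.pyRange 0 (life.length : Int) 1).foldl (fun (st : List String × Nat) j =>
        let l := PySem.List.pyGetD life j ""
        (PySem.List.pyRange 0 (sleep.length : Int) 1).foldl (fun (st : List String × Nat) s =>
          let sp := PySem.List.pyGetD sleep s ""
          if g == l && sp == g && l == sp then (st.1.set st.2 g, st.2 + 1) else st) st) st) _) ?_
    exact PySem.List.foldl_congr_mem _ _ _ _ (fun st g _ => h2 g st)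
  simp only [wizards]
  rw [h1]
  simp [PySem.List.slice_zero_start, PySem.List.slice_to_natCast]

lemma wizStep_ne (g l : String) (h : (g == l) = false) (sl : List String)
    (st : List String × Nat) : sl.foldl (wizStep g l) st = st := by
  induction sl generalizing st with
  | nil => rfl
  | cons sp t ih => simp [wizStep, h, ih]

lemma wizSleepLoop (g : String) (sl : List String) : ∀ (P : List String) (pad : Nat),
    List.count g sl ≤ pad →
    sl.foldl (wizStep g g) (P ++ List.replicate pad "", P.length)
    = (P ++ List.replicate (List.count g sl) g ++ List.replicate (pad - List.count g sl) "",
       P.length + List.count g sl) := by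
  induction sl with
  | nil => intro P pad h; simp
  | cons sp t ih =>
    intro P pad h
    by_cases hsp : sp = g
    · have hc : (sp == g) = true := beq_iff_eq.mpr hsp
      have hc' : (g == sp) = true := beq_iff_eq.mpr hsp.symm
      have hcnt : List.count g (sp :: t) = List.count g t + 1 := by
        simp [List.count_cons, hc]
      rw [hcnt] at h ⊢
      have hstep : wizStep g g (P ++ List.replicate pad "", P.length) sp
          = ((P ++ [g]) ++ List.replicate (pad - 1) "", (P ++ [g]).length) := by
        simp [wizStep, hc, hc']
        cases pad with
        | zero => omega
        | succ m => simp [List.replicate_succ]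
      rw [List.foldl_cons, hstep, ih (P ++ [g]) (pad - 1) (by omega)]
      have hpad : pad - 1 - List.count g t = pad - (List.count g t + 1) := by omega
      simp [List.append_assoc, List.replicate_succ, hpad]
      omega
    · have hc : (sp == g) = false := by simp [hsp]
      have hstep : wizStep g g (P ++ List.replicate pad "", P.length) sp
          = (P ++ List.replicate pad "", P.length) := by
        simp [wizStep, hc]
      have hcnt : List.count g (sp :: t) = List.count g t := by
        simp [List.count_cons, hc]
      rw [List.foldl_cons, hstep, hcnt]
      exact ih P pad (by rw [hcnt] at h; exact h)

lemma wizLifeLoop (g : String) (lf sl : List String) : ∀ (P : List String) (pad : Nat),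
    List.count g lf * List.count g sl ≤ pad →
    lf.foldl (fun st l => sl.foldl (wizStep g l) st) (P ++ List.replicate pad "", P.length)
    = (P ++ List.replicate (List.count g lf * List.count g sl) g
          ++ List.replicate (pad - List.count g lf * List.count g sl) "",
       P.length + List.count g lf * List.count g sl) := by
  induction lf with
  | nil => intro P pad h; simp
  | cons l t ih =>
    intro P pad h
    by_cases hl : g = l
    · subst hl
      have hc : (g == g) = true := beq_self_eq_true g
      have hcnt : List.count g (g :: t) = List.count g t + 1 := by
        simp
      rw [hcnt] at h ⊢
      have hb : List.count g sl ≤ pad := by nlinarith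
      rw [List.foldl_cons, wizSleepLoop g sl P pad hb]
      have hlen : (P ++ List.replicate (List.count g sl) g).length
          = P.length + List.count g sl := by simp
      have hsm : (List.count g t + 1) * List.count g sl
          = List.count g t * List.count g sl + List.count g sl := Nat.succ_mul _ _
      rw [← hlen, ih (P ++ List.replicate (List.count g sl) g) (pad - List.count g sl)
        (by omega)]
      have e1 : pad - List.count g sl - List.count g t * List.count g sl
          = pad - (List.count g t + 1) * List.count g sl := by omega
      have e2 : List.count g sl + List.count g t * List.count g sl
          = (List.count g t + 1) * List.count g sl := by omega
      simp [List.append_assoc, hlen, e1]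
      constructor
      · omega
      · omega
    · have hc : (g == l) = false := by simp [hl]
      have hcnt : List.count g (l :: t) = List.count g t := by
        have hlg : l ≠ g := fun e => hl e.symm
        simp [hlg]
      rw [List.foldl_cons, wizStep_ne g l hc sl _, hcnt]
      exact ih P pad (by rw [hcnt] at h; exact h)

lemma wizGradeLoop (lf sl : List String) : ∀ (gr P : List String) (pad : Nat),
    (gr.map (fun g => List.count g lf * List.count g sl)).sum ≤ pad →
    gr.foldl (fun st g => lf.foldl (fun st l => sl.foldl (wizStep g l) st) st)
      (P ++ List.replicate pad "", P.length)
    = (P ++ gr.flatMap (fun g => List.replicate (List.count g lf * List.count g sl) g)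
          ++ List.replicate (pad - (gr.map (fun g => List.count g lf * List.count g sl)).sum) "",
       P.length + (gr.map (fun g => List.count g lf * List.count g sl)).sum) := by
  intro gr
  induction gr with
  | nil => intro P pad h; simp
  | cons g t ih =>
    intro P pad h
    simp only [List.map_cons, List.sum_cons] at h ⊢
    have hb : List.count g lf * List.count g sl ≤ pad := by omega
    rw [List.foldl_cons, wizLifeLoop g lf sl P pad hb]
    have hlen : (P ++ List.replicate (List.count g lf * List.count g sl) g).length
        = P.length + List.count g lf * List.count g sl := by simp
    rw [← hlen, ih (P ++ List.replicate (List.count g lf * List.count g sl) g)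
      (pad - List.count g lf * List.count g sl) (by omega)]
    have e1 : pad - List.count g lf * List.count g sl
        - (t.map (fun g => List.count g lf * List.count g sl)).sum
        = pad - (List.count g lf * List.count g sl
            + (t.map (fun g => List.count g lf * List.count g sl)).sum) := by omega
    simp [List.append_assoc, hlen, e1, List.flatMap_cons]
    omega

lemma wiz_alt_eq (grades life sleep : List String) :
    wizards_alt grades life sleep
      = grades.flatMap (fun g => List.replicate (List.count g life * List.count g sleep) g) := by
  unfold wizards_alt
  rw [PySem.Dict.foldl_insert_getD_add_one_eq_counter,
      PySem.Dict.foldl_insert_getD_add_one_eq_counter,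
      PySem.List.foldl_append_eq_flatMap]
  have htn : ∀ a b : Nat, (((a : Int)) * ((b : Int))).toNat = a * b := by
    intro a b; rw [← Nat.cast_mul, Int.toNat_natCast]
  simp only [PySem.Dict.getD_counter, htn, List.nil_append]

theorem wiz_main (grades life sleep : List String)
    (pre : (grades.map (fun g => List.count g life * List.count g sleep)).sum
      ≤ grades.length + life.length + sleep.length) :
    wizards grades life sleep = wizards_alt grades life sleep := by
  rw [wiz_eq_foldl, wiz_alt_eq]
  have h0 : ((List.replicate (grades.length + life.length + sleep.length) "" : List String), 0)
      = (([] : List String) ++ List.replicate (grades.length + life.length + sleep.length) "",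
         ([] : List String).length) := by simp
  rw [h0, wizGradeLoop life sleep grades []
    (grades.length + life.length + sleep.length) pre]
  have hlen : (grades.flatMap
      (fun g => List.replicate (List.count g life * List.count g sleep) g)).length
      = (grades.map (fun g => List.count g life * List.count g sleep)).sum := by
    simp [List.length_flatMap]
  simp only [List.nil_append, List.length_nil, Nat.zero_add]
  rw [← hlen, List.take_left]

-- ===== VERDICT (by name: the statement is the Claim_ definition above) =====
theorem wizards_spec : Claim_equal_wizards := by
  intro grades life sleep _ hpre
  unfold Pre_wizards at hpre
  unfold Spec_wizards
  exact wiz_main grades life sleep hpre
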